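-- pv_equiv track=rewrite | github.com/pypi-data/pypi-mirror-402 | packages/pygarble/pygarble-0.5.0-py3-none-any.whl/pygarble/strategies/ngram_frequency.py | _extract_trigrams
-- ===== SOURCE A (Python) =====
-- def _extract_trigrams(text: str) -> list:
--     """Extract all alphabetic trigrams from text."""
--     text = text.lower()
--     trigrams = []
--
--     # Extract trigrams from each word
--     words = text.split()
--     for word in words:
--         # Keep only alphabetic characters
--         word = "".join(c for c in word if c.isalpha())
--         if len(word) >= 3:
--             for i in range(len(word) - 2):
--                 trigrams.append(word[i:i + 3])
--
--     return trigrams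
-- ===== SOURCE B (Python) =====
-- def _extract_trigrams(text: str) -> list:
--     """Extract all alphabetic trigrams from text (single fused streaming scan)."""
--     trigrams = []
--     buf = []
--     for c in text.lower():
--         if c.isspace():
--             for i in range(len(buf) - 2):
--                 trigrams.append("".join(buf[i:i + 3]))
--             buf = []
--         elif c.isalpha():
--             buf.append(c)
--         # any other character is simply skipped (it would be filtered out anyway)
--     for i in range(len(buf) - 2):
--         trigrams.append("".join(buf[i:i + 3]))
--     return trigrams
-- ===== Notes on version B (the rewrite author's own statement) =====
-- stated objective: alternative
-- what changed: Replaces split()-into-words plus a per-word join/filter/window pass by a single fused streaming scan over the characters that maintains the current alphabetic buffer and flushes trigram windows at whitespace and at end of input.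
import Mathlib
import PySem

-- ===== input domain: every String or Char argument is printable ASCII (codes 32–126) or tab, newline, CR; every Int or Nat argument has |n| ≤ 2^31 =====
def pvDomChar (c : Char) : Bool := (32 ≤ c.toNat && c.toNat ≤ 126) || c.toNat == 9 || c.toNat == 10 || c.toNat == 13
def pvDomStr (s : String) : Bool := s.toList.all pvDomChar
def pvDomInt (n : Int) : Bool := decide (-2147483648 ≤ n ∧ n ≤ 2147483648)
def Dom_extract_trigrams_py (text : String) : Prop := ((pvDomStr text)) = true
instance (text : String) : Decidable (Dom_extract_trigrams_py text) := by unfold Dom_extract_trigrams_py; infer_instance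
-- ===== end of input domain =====

-- B replaces split()+per-word filter/window by one fused streaming scan over the characters (alternative decomposition, same cost).


-- ===== PORT A =====
-- text = text.lower(); for word in text.split(): word = join(filter isalpha); if len>=3: append word[i:i+3]
def extract_trigrams_py (text : String) : List String :=
  let t := PySem.Str.lower text
  (PySem.Str.split₀ t).foldl (fun trigrams word =>
    let w := word.toList.filter PySem.Chars.isalpha
    if 3 ≤ w.length then
      (PySem.List.pyRange 0 ((w.length : Int) - 2) 1).foldl
        (fun acc i => acc ++ [String.ofList (PySem.List.slice w (some i) (some (i + 3)))]) trigrams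
    else trigrams) []

-- ===== PORT B =====
-- flush: for i in range(len(buf) - 2): trigrams.append("".join(buf[i:i+3]))
def pvFlush (trigrams : List String) (buf : List Char) : List String :=
  trigrams ++ (List.range (buf.length - 2)).map (fun i => String.ofList ((buf.drop i).take 3))

-- one pass over text.lower(): whitespace flushes the buffer, alphabetic chars extend it, others are skipped
def extract_trigrams_py_alt (text : String) : List String :=
  let st := (PySem.Str.lower text).toList.foldl
    (fun (st : List String × List Char) c =>
      if PySem.Chars.isspace c then (pvFlush st.1 st.2, [])
      else if PySem.Chars.isalpha c then (st.1, st.2 ++ [c])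
      else st) ([], [])
  pvFlush st.1 st.2

-- ===== PRECONDITION & SPEC =====
def Spec_extract_trigrams_py (text : String) (out : List String) : Prop := out = extract_trigrams_py_alt text
instance (text : String) (out : List String) : Decidable (Spec_extract_trigrams_py text out) := by unfold Spec_extract_trigrams_py; infer_instance

-- ===== CLAIM (what is proved, stated in full; the proofs are below) =====
def Claim_equal_extract_trigrams_py : Prop := ∀ (text : String), Dom_extract_trigrams_py text → Spec_extract_trigrams_py text (extract_trigrams_py text)

-- ===== LEMMAS AND PROOFS =====

-- A's per-word body equals a flush of the filtered word
theorem pv_perword_eq_flush (tr : List String) (w : List Char) :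
    (let fw := w.filter PySem.Chars.isalpha
     if 3 ≤ fw.length then
       (PySem.List.pyRange 0 ((fw.length : Int) - 2) 1).foldl
         (fun acc i => acc ++ [String.ofList (PySem.List.slice fw (some i) (some (i + 3)))]) tr
     else tr) = pvFlush tr (w.filter PySem.Chars.isalpha) := by
  set fw := w.filter PySem.Chars.isalpha with hfw
  by_cases h3 : 3 ≤ fw.length
  · have hcast : ((fw.length : Int) - 2) = ((fw.length - 2 : Nat) : Int) := by omega
    simp only [h3, if_pos, hcast, PySem.List.pyRange_zero_nat, List.foldl_map,
      PySem.List.foldl_append_singleton_eq_map, pvFlush]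
    congr 1
    apply List.map_congr_left
    intro k _
    have : ((k : Int) + 3) = ((k + 3 : Nat) : Int) := by omega
    rw [this, PySem.List.slice_natCast, Nat.add_sub_cancel_left]
  · have hlen : fw.length - 2 = 0 := by omega
    simp [h3, pvFlush, hlen]

-- a reversed-accumulator-free description of split₀.go
def pvGo : List Char → List Char → List (List Char)
  | [], cur => if cur.isEmpty then [] else [cur.reverse]
  | c :: rest, cur =>
    if PySem.Chars.isspace c then
      (if cur.isEmpty then id else (cur.reverse :: ·)) (pvGo rest [])
    else pvGo rest (c :: cur)

theorem pv_go_eq (l : List Char) : ∀ (cur : List Char) (acc : List (List Char)),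
    PySem.Chars.split₀.go l cur acc = acc.reverse ++ pvGo l cur := by
  induction l with
  | nil =>
    intro cur acc
    by_cases h : cur.isEmpty <;> simp [PySem.Chars.split₀.go, pvGo, h]
  | cons c rest ih =>
    intro cur acc
    by_cases hs : PySem.Chars.isspace c
    · by_cases he : cur.isEmpty <;>
        simp [PySem.Chars.split₀.go, pvGo, hs, he, ih]
    · simp [PySem.Chars.split₀.go, pvGo, hs, ih]

-- flushing an empty (or too short) buffer is a no-op
theorem pv_flush_nil (tr : List String) : pvFlush tr [] = tr := by
  simp [pvFlush]

-- the streaming invariant: the fold over the remaining characters, started with the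
-- filtered reversed current word as buffer, computes the per-word folds over pvGo
theorem pv_stream (l : List Char) : ∀ (cur : List Char) (tr : List String),
    (let st := l.foldl
        (fun (st : List String × List Char) c =>
          if PySem.Chars.isspace c then (pvFlush st.1 st.2, [])
          else if PySem.Chars.isalpha c then (st.1, st.2 ++ [c])
          else st) (tr, cur.reverse.filter PySem.Chars.isalpha)
     pvFlush st.1 st.2)
    = (pvGo l cur).foldl (fun t w => pvFlush t (w.filter PySem.Chars.isalpha)) tr := by
  induction l with
  | nil =>
    intro cur tr
    by_cases he : cur.isEmpty
    · have : cur = [] := by simpa [List.isEmpty_iff] using he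
      simp [pvGo, this, pv_flush_nil]
    · simp [pvGo, he]
  | cons c rest ih =>
    intro cur tr
    by_cases hs : PySem.Chars.isspace c
    · have hbuf : ([] : List Char) = ([] : List Char).reverse.filter PySem.Chars.isalpha := rfl
      by_cases he : cur.isEmpty
      · have hc : cur = [] := by simpa [List.isEmpty_iff] using he
        simp only [List.foldl_cons, hs, if_pos, pvGo, he, id]
        rw [hc]
        simpa [pv_flush_nil] using ih [] tr
      · simp only [List.foldl_cons, hs, if_pos, pvGo, he, List.foldl_cons]
        simpa using ih [] (pvFlush tr (cur.reverse.filter PySem.Chars.isalpha))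
    · by_cases ha : PySem.Chars.isalpha c
      · have hbuf : cur.reverse.filter PySem.Chars.isalpha ++ [c]
            = (c :: cur).reverse.filter PySem.Chars.isalpha := by
          simp [List.filter_append, ha]
        simp only [List.foldl_cons, hs, ha, if_pos, pvGo]
        rw [hbuf]
        exact ih (c :: cur) tr
      · have hbuf : cur.reverse.filter PySem.Chars.isalpha
            = (c :: cur).reverse.filter PySem.Chars.isalpha := by
          simp [List.filter_append, ha]
        simp only [List.foldl_cons, hs, ha, pvGo]
        rw [hbuf]
        exact ih (c :: cur) tr

-- ===== VERDICT (by name: the statement is the Claim_ definition above) =====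
theorem extract_trigrams_py_spec : Claim_equal_extract_trigrams_py := by
  intro text _
  unfold Spec_extract_trigrams_py
  simp only [extract_trigrams_py, extract_trigrams_py_alt]
  set l := (PySem.Str.lower text).toList with hl
  have hstream := pv_stream l [] []
  simp only [List.reverse_nil, List.filter_nil] at hstream
  rw [hstream]
  have hsplit : PySem.Chars.split₀ l = pvGo l [] := by
    rw [PySem.Chars.split₀, pv_go_eq]; rfl
  have hA : PySem.Str.split₀ (PySem.Str.lower text)
      = (pvGo l []).map String.ofList := by
    rw [PySem.Str.split₀, hsplit]
  rw [hA, List.foldl_map]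
  apply List.foldl_ext
  intro tr w _
  simpa using pv_perword_eq_flush tr w
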